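-- pv_equiv track=rewrite | github.com/rwu8/MIT-6.00.1x | Midterm.py | largest_odd_times
-- ===== SOURCE A (Python) =====
-- def largest_odd_times(L):
--     """ Assumes L is a non-empty list of ints
--         Returns the largest element of L that occurs an odd number
--         of times in L. If no such element exists, returns None """
--     # Your code here
--     largest=  0
--     dict = {}
--     new_dict = {}
--     for i in L:
--         dict.setdefault(i,0)
--         dict[i]= dict[i] + 1
--
--     for k,v in dict.items():
--         if v % 2 == 1:
--             new_dict.setdefault(k,0)
--
--     for k,v in new_dict.items():
--         largest = max(k for k, v in new_dict.items())
--         return largest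
--     return
-- ===== SOURCE B (Python) =====
-- def largest_odd_times(L):
--     """ Assumes L is a non-empty list of ints
--         Returns the largest element of L that occurs an odd number
--         of times in L. If no such element exists, returns None """
--     s = set()
--     for x in L:
--         if x in s:
--             s.remove(x)
--         else:
--             s.add(x)
--     return max(s) if s else None
-- ===== Notes on version B (the rewrite author's own statement) =====
-- stated objective: simpler
-- what changed: Replaces A's three phases (count dict, odd-filter dict, max over keys) by a single pass that toggles each element's set membership (present after the pass = odd count) followed by one max.
import Mathlib
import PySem

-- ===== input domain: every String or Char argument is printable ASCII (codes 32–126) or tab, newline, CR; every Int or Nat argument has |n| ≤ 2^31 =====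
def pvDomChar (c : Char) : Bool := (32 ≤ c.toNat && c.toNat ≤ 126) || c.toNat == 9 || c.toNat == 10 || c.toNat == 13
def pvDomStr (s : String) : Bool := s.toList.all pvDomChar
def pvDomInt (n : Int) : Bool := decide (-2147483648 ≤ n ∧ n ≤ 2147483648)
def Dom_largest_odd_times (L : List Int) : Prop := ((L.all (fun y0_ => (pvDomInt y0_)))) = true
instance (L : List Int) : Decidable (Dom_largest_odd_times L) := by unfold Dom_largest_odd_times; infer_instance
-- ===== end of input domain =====

-- B replaces A's count-dict + odd-filter-dict + max-over-keys loops by one toggling pass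
-- over a set plus a single max (objective: simpler).


-- ===== PORT A =====
-- dict.setdefault(i,0); dict[i] = dict[i] + 1   /   'if v % 2 == 1: new_dict.setdefault(k,0)'  /
-- the last loop returns max(k for k, v in new_dict.items()) on its first iteration, else the
-- function falls through to the bare 'return' (None).
def largest_odd_times (L : List Int) : Option Int :=
  let d : PySem.Dict Int Int :=
    L.foldl (fun d i =>
      let d := PySem.Dict.setdefault d i 0
      PySem.Dict.insert d i (PySem.Dict.getD d i 0 + 1)) PySem.Dict.empty
  let nd : PySem.Dict Int Int :=
    (PySem.Dict.items d).foldl (fun nd kv =>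
      if PySem.Int.mod kv.2 2 = 1 then PySem.Dict.setdefault nd kv.1 0 else nd) PySem.Dict.empty
  match PySem.Dict.items nd with
  | [] => none
  | _ :: _ => PySem.List.max? ((PySem.Dict.items nd).map Prod.fst) (fun k => k)

-- ===== PORT B =====
-- for x in L: if x in s: s.remove(x) else: s.add(x);  return max(s) if s else None
def largest_odd_times_alt (L : List Int) : Option Int :=
  let s : PySem.Set Int :=
    L.foldl (fun s x =>
      if PySem.Set.contains s x then PySem.Set.discard s x else PySem.Set.add s x)
      PySem.Set.empty
  match s with
  | [] => none
  | _ :: _ => PySem.List.max? s (fun y => y)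

-- ===== PRECONDITION & SPEC =====
def Spec_largest_odd_times (L : List Int) (out : Option Int) : Prop := out = largest_odd_times_alt L
instance (L : List Int) (out : Option Int) : Decidable (Spec_largest_odd_times L out) := by unfold Spec_largest_odd_times; infer_instance

-- ===== CLAIM (what is proved, stated in full; the proofs are below) =====
def Claim_equal_largest_odd_times : Prop := ∀ (L : List Int), Dom_largest_odd_times L → Spec_largest_odd_times L (largest_odd_times L)

-- ===== LEMMAS AND PROOFS =====

-- A's first loop body (setdefault then increment) is exactly the counter step.
theorem counter_step_eq (d : PySem.Dict Int Int) (i : Int) :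
    (PySem.Dict.setdefault d i 0).insert i ((PySem.Dict.setdefault d i 0).getD i 0 + 1)
      = d.insert i (d.getD i 0 + 1) := by
  rw [PySem.Dict.getD_setdefault_self]
  by_cases h : d.contains i = true
  · rw [PySem.Dict.setdefault_of_contains _ _ h]
  · rw [PySem.Dict.setdefault_of_not_contains _ _ (by simpa using h),
        PySem.Dict.insert_insert_self]

-- keys of a setdefault-accumulating fold: membership.
theorem mem_keys_foldl_setdefault (l : List (Int × Int)) (d : PySem.Dict Int Int) (k : Int) :
    k ∈ (l.foldl (fun nd kv => nd.setdefault kv.1 0) d).keys ↔ k ∈ d.keys ∨ k ∈ l.map Prod.fst := by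
  induction l generalizing d with
  | nil => simp
  | cons kv t ih =>
    simp only [List.foldl_cons, ih, List.map_cons, List.mem_cons]
    by_cases h : d.contains kv.1 = true
    · rw [PySem.Dict.setdefault_of_contains _ _ h]
      have := (PySem.Dict.contains_iff_mem_keys (d := d) (k := kv.1)).mp h
      constructor
      · tauto
      · rintro (h1 | h1 | h1) <;> simp_all
    · rw [PySem.Dict.setdefault_of_not_contains _ _ (by simpa using h),
          PySem.Dict.keys_insert_of_not_contains _ _ (by simpa using h)]
      simp; tauto

-- membership in A's candidate key list is odd occurrence count.
theorem mem_A_keys (L : List Int) (k : Int) :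
    k ∈ (((PySem.Dict.counter L).items.foldl (fun nd kv =>
        if PySem.Int.mod kv.2 2 = 1 then PySem.Dict.setdefault nd kv.1 0 else nd)
        (PySem.Dict.empty : PySem.Dict Int Int)).items.map Prod.fst) ↔ L.count k % 2 = 1 := by
  rw [PySem.List.foldl_ite_eq_foldl_filter (p := fun kv : Int × Int => PySem.Int.mod kv.2 2 = 1)]
  have hk : (((PySem.Dict.counter L).items.filter
        (fun kv => decide (PySem.Int.mod kv.2 2 = 1))).foldl
        (fun nd kv => nd.setdefault kv.1 0) (PySem.Dict.empty : PySem.Dict Int Int)).keys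
      = (((PySem.Dict.counter L).items.filter
        (fun kv => decide (PySem.Int.mod kv.2 2 = 1))).foldl
        (fun nd kv => nd.setdefault kv.1 0) (PySem.Dict.empty : PySem.Dict Int Int)).items.map Prod.fst := rfl
  rw [← hk]
  refine (mem_keys_foldl_setdefault _ PySem.Dict.empty k).trans ?_
  rw [PySem.Dict.items_counter]
  simp only [PySem.Dict.keys_empty, List.mem_nil_iff, false_or, List.mem_map,
    List.mem_filter, List.filter_map, List.mem_map, Function.comp]
  constructor
  · rintro ⟨a, ⟨j, ⟨hj, hodd⟩, rfl⟩, rfl⟩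
    simp only [decide_eq_true_eq] at hodd
    have h2 : PySem.Int.mod ((List.count j L : Nat) : Int) 2 = ((List.count j L % 2 : Nat) : Int) := by
      exact_mod_cast PySem.Int.mod_natCast (List.count j L) 2
    rw [h2] at hodd
    exact_mod_cast hodd
  · intro hodd
    have hmem : k ∈ PySem.Set.ofList L := by
      rw [PySem.Set.mem_ofList]
      exact List.count_pos_iff.mp (by omega)
    exact ⟨(k, (L.count k : Int)), ⟨k, ⟨hmem,
      by
        simp only [decide_eq_true_eq]
        have h2 : PySem.Int.mod ((List.count k L : Nat) : Int) 2 = ((List.count k L % 2 : Nat) : Int) := by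
          exact_mod_cast PySem.Int.mod_natCast (List.count k L) 2
        rw [h2]; exact_mod_cast hodd⟩, rfl⟩, rfl⟩

-- B's toggle loop: membership after the pass is parity of the count.
theorem mem_toggle (L : List Int) (s0 : PySem.Set Int) (x : Int) :
    x ∈ L.foldl (fun s y =>
        if PySem.Set.contains s y then PySem.Set.discard s y else PySem.Set.add s y) s0
      ↔ ((x ∈ s0) ↔ L.count x % 2 = 0) := by
  induction L generalizing s0 with
  | nil => simp
  | cons a t ih =>
    simp only [List.foldl_cons, ih]
    by_cases hx : x = a
    · subst hx
      have hcnt : (x :: t).count x = t.count x + 1 := by simp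
      rw [hcnt]
      by_cases hm : x ∈ s0
      · rw [if_pos ((PySem.Set.contains_iff s0 x).mpr hm)]
        simp [PySem.Set.mem_discard, hm]
        omega
      · rw [if_neg (by simp [hm])]
        simp [hm]
        omega
    · have hax : ¬ a = x := fun h => hx h.symm
      have hcnt : (a :: t).count x = t.count x := by simp [hax]
      rw [hcnt]
      by_cases hm : a ∈ s0
      · rw [if_pos ((PySem.Set.contains_iff s0 a).mpr hm)]
        simp [PySem.Set.mem_discard, hx]
      · rw [if_neg (by simp [hm])]
        simp [PySem.Set.mem_add, hx]

-- proof-only views of the two result shapes.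
def pvMaxKeys (ndi : List (Int × Int)) : Option Int :=
  match ndi with
  | [] => none
  | _ :: _ => PySem.List.max? (ndi.map Prod.fst) (fun k => k)

def pvMaxSet (s : List Int) : Option Int :=
  match s with
  | [] => none
  | _ :: _ => PySem.List.max? s (fun y => y)

-- both sides pick the maximum of two lists with the same members (none when empty).
theorem match_max_eq (ndi : List (Int × Int)) (s : List Int)
    (hmem : ∀ k, k ∈ ndi.map Prod.fst ↔ k ∈ s) :
    pvMaxKeys ndi = pvMaxSet s := by
  cases ndi with
  | nil =>
    cases s with
    | nil => rfl
    | cons b bs => exact absurd ((hmem b).mpr (by simp)) (by simp)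
  | cons p rest =>
    cases s with
    | nil => exact absurd ((hmem p.1).mp (by simp)) (by simp)
    | cons b bs =>
      show PySem.List.max? ((p :: rest).map Prod.fst) (fun k => k)
            = PySem.List.max? (b :: bs) (fun y => y)
      cases hma : PySem.List.max? ((p :: rest).map Prod.fst) (fun k => k) with
      | none => exact absurd ((PySem.List.max?_eq_none_iff _ _).mp hma) (by simp)
      | some ma =>
        cases hmb : PySem.List.max? (b :: bs) (fun y => y) with
        | none => exact absurd ((PySem.List.max?_eq_none_iff _ _).mp hmb) (by simp)
        | some mb =>
          have hma_mem : ma ∈ b :: bs := (hmem ma).mp (PySem.List.max?_mem hma)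
          have hmb_mem : mb ∈ (p :: rest).map Prod.fst := (hmem mb).mpr (PySem.List.max?_mem hmb)
          have h1 : ma ≤ mb := PySem.List.max?_isMax hmb ma hma_mem
          have h2 : mb ≤ ma := PySem.List.max?_isMax hma mb hmb_mem
          rw [le_antisymm h1 h2]

-- A's first loop builds exactly Counter(L).
theorem d_eq_counter (L : List Int) :
    L.foldl (fun d i =>
      let d := PySem.Dict.setdefault d i 0
      PySem.Dict.insert d i (PySem.Dict.getD d i 0 + 1)) PySem.Dict.empty
      = PySem.Dict.counter L := by
  have hf : (fun (d : PySem.Dict Int Int) (i : Int) =>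
      let d := PySem.Dict.setdefault d i 0
      PySem.Dict.insert d i (PySem.Dict.getD d i 0 + 1))
      = fun d i => d.insert i (d.getD i 0 + 1) :=
    funext fun d => funext fun i => counter_step_eq d i
  rw [hf, PySem.Dict.foldl_insert_getD_add_one_eq_counter]

-- ===== VERDICT (by name: the statement is the Claim_ definition above) =====
theorem largest_odd_times_spec : Claim_equal_largest_odd_times := by
  intro L _
  show largest_odd_times L = largest_odd_times_alt L
  have hmem : ∀ k, k ∈ (((PySem.Dict.counter L).items.foldl (fun nd kv =>
        if PySem.Int.mod kv.2 2 = 1 then PySem.Dict.setdefault nd kv.1 0 else nd)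
        (PySem.Dict.empty : PySem.Dict Int Int)).items.map Prod.fst)
      ↔ k ∈ L.foldl (fun s x =>
        if PySem.Set.contains s x then PySem.Set.discard s x else PySem.Set.add s x)
        (PySem.Set.empty : PySem.Set Int) := by
    intro k
    rw [mem_A_keys, mem_toggle]
    simp only [PySem.Set.empty, List.mem_nil_iff, false_iff]
    omega
  have h := match_max_eq _ _ hmem
  unfold largest_odd_times largest_odd_times_alt
  rw [d_eq_counter]
  exact h
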